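-- pv_equiv track=rewrite | github.com/DevrathIyer/openlane2 | openlane/common/metrics/util.py | _key_from_metrics
-- ===== SOURCE A (Python) =====
-- from typing import (
--     List,
--     Mapping,
--     Tuple,
--     Dict,
--     Any,
--     Iterable,
--     Optional,
--     Union,
-- )
--
-- def parse_metric_modifiers(metric_name: str) -> Tuple[str, Mapping[str, str]]:
--     """
--     Parses a metric name into a base and modifiers as specified in
--     the METRICS2.1 naming convention.
--
--     :param metric_name: The name of the metric as generated by a utility.
--     :returns: A tuple of the base part as a string, then the modifiers as
--         a key-value mapping.
--     """
--     mn_mut = metric_name.split("__")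
--     modifiers = {}
--     while ":" in mn_mut[-1]:
--         key, value = mn_mut.pop().split(":", maxsplit=1)
--         modifiers[key] = value
--     return "__".join(mn_mut), {k: modifiers[k] for k in reversed(modifiers)}
--
-- def _key_from_metrics(fields: Iterable[str], metric: str) -> List[str]:
--     base, modifiers = parse_metric_modifiers(metric)
--     result = []
--     for field in fields:
--         if field == "":
--             result.append(base)
--         else:
--             result.append(modifiers.get(field, ""))
--     return result
-- ===== SOURCE B (Python) =====
-- def _key_from_metrics(fields, metric):
--     parts = metric.split("__")
--     i = len(parts)
--     while i > 0 and ":" in parts[i - 1]: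
--         i -= 1
--     base = "__".join(parts[:i])
--     modifiers = {}
--     for seg in parts[i:]:
--         key, value = seg.split(":", maxsplit=1)
--         if key not in modifiers:
--             modifiers[key] = value
--     return [base if field == "" else modifiers.get(field, "") for field in fields]
-- ===== Notes on version B (the rewrite author's own statement) =====
-- stated objective: simpler
-- what changed: Instead of A's destructive pop-from-the-right loop that builds the modifier dict right-to-left with overwrites and then rebuilds it reversed, B computes the base/modifier boundary index first, joins parts[:i] for the base, and fills the dict in one forward first-occurrence-wins pass over parts[i:].
import Mathlib
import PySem

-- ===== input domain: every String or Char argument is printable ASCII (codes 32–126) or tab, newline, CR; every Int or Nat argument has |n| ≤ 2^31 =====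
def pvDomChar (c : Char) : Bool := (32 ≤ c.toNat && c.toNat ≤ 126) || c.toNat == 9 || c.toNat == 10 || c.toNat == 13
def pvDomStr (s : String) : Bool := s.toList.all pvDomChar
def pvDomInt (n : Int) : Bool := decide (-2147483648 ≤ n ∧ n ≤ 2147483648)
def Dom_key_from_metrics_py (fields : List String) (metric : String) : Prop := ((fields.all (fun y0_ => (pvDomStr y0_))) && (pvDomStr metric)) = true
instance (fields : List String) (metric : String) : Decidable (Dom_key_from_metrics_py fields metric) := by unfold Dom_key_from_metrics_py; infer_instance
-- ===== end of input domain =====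

-- B rewrites the modifier parse without the pop-then-reverse trick: find the base/modifier
-- boundary index first, then one forward first-occurrence-wins pass (objective: simpler).

-- ===== PORT A =====
-- A's while loop: while ":" in mn_mut[-1]: key, value = mn_mut.pop().split(":", maxsplit=1); modifiers[key] = value.
-- none = the IndexError mn_mut[-1] raises when the list has been emptied.
def pvAParseF : Nat → List String → PySem.Dict String String →
    Option (List String × PySem.Dict String String)
  | 0, _, _ => none   -- fuel only bounds the recursion; mn.length + 1 steps always suffice
  | fuel + 1, mn, mods =>
    match mn.getLast? with
    | none => none      -- mn_mut[-1] raises IndexError on the empty list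
    | some last =>
      if PySem.Str.isIn ":" last then
        match PySem.Str.splitMax? last ":" 1 with
        | some [key, value] => pvAParseF fuel mn.dropLast (mods.insert key value)
        | _ => none     -- unreachable: split(":", maxsplit=1) with ":" present yields exactly 2 parts
      else some (mn, mods)

def pvAParse (mn : List String) (mods : PySem.Dict String String) :
    Option (List String × PySem.Dict String String) :=
  pvAParseF (mn.length + 1) mn mods

def key_from_metrics_py (fields : List String) (metric : String) : List String :=
  let mn := (PySem.Str.split? metric "__").getD [metric]   -- sep "__" ≠ "", split? is always some
  match pvAParse mn PySem.Dict.empty with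
  | none => []          -- A raises IndexError here; excluded by Pre_
  | some (mnFin, mods) =>
    let base := PySem.Str.join "__" mnFin
    -- {k: modifiers[k] for k in reversed(modifiers)}; k ∈ keys, so the total getD lookup is exact
    let modifiers := (mods.keys.reverse).foldl
      (fun d k => d.insert k (mods.getD k "")) PySem.Dict.empty
    fields.foldl (fun result field =>
      result ++ [if field == "" then base else modifiers.getD field ""]) []

-- ===== PORT B =====
-- while i > 0 and ":" in parts[i-1]: i -= 1   (parts[i-1] is in range: 0 < i ≤ len parts at every call)
def pvBBoundary (parts : List String) : Nat → Nat
  | 0 => 0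
  | n + 1 => if PySem.Str.isIn ":" (parts.getD n "") then pvBBoundary parts n else n + 1

def key_from_metrics_py_alt (fields : List String) (metric : String) : List String :=
  let parts := (PySem.Str.split? metric "__").getD [metric]   -- sep "__" ≠ "", split? is always some
  let i := pvBBoundary parts parts.length
  let base := PySem.Str.join "__" (parts.take i)              -- "__".join(parts[:i])
  let modifiers := (parts.drop i).foldl (fun d seg =>         -- forward pass over parts[i:]
    match PySem.Str.splitMax? seg ":" 1 with
    | some (key :: value :: _) => if d.contains key then d else d.insert key value
    | _ => d) PySem.Dict.empty                                -- unreachable: every seg of parts[i:] contains ":"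
  fields.map (fun field => if field == "" then base else modifiers.getD field "")

-- ===== PRECONDITION & SPEC =====
-- Pre_ excludes exactly the metrics whose every "__"-segment contains ":": there A's while
-- loop empties mn_mut and mn_mut[-1] raises IndexError.
def Pre_key_from_metrics_py (fields : List String) (metric : String) : Prop :=
  ∃ p ∈ (PySem.Str.split? metric "__").getD [metric], PySem.Str.isIn ":" p = false
instance (fields : List String) (metric : String) : Decidable (Pre_key_from_metrics_py fields metric) := by unfold Pre_key_from_metrics_py; infer_instance
def pvWitness_key_from_metrics_py : List String × String := (["", "power"], "design__power:3")

def Spec_key_from_metrics_py (fields : List String) (metric : String) (out : List String) : Prop := out = key_from_metrics_py_alt fields metric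
instance (fields : List String) (metric : String) (out : List String) : Decidable (Spec_key_from_metrics_py fields metric out) := by unfold Spec_key_from_metrics_py; infer_instance

-- ===== CLAIM (what is proved, stated in full; the proofs are below) =====
def Claim_equal_key_from_metrics_py : Prop := ∀ (fields : List String) (metric : String), Dom_key_from_metrics_py fields metric → Pre_key_from_metrics_py fields metric → Spec_key_from_metrics_py fields metric (key_from_metrics_py fields metric)

-- ===== LEMMAS AND PROOFS =====

-- key/value a trailing segment contributes (proof-side view of seg.split(":", maxsplit=1))
def pvKV (s : String) : String × String :=
  match PySem.Str.splitMax? s ":" 1 with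
  | some (k :: v :: _) => (k, v)
  | _ => (s, "")

-- the value both dicts answer for field f: the LEFTMOST trailing segment whose key is f
def pvFind (segs : List String) (f : String) : Option String :=
  (segs.find? (fun s => (pvKV s).1 == f)).map (fun s => (pvKV s).2)

lemma pv_go_m0 (sep : List Char) (fuel : Nat) (l cur : List Char) (acc : List (List Char)) :
    PySem.Chars.splitOnMax.go sep fuel 0 l cur acc = ((cur.reverse ++ l) :: acc).reverse := by
  cases fuel <;> cases l <;> simp [PySem.Chars.splitOnMax.go]

lemma pv_go_two (fuel : Nat) : ∀ (l cur : List Char) (acc : List (List Char)),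
    l.length < fuel → ':' ∈ l →
    ∃ k v, PySem.Chars.splitOnMax.go [':'] fuel 1 l cur acc = acc.reverse ++ [k, v] := by
  induction fuel with
  | zero => intro l cur acc h _; omega
  | succ fuel ih =>
    intro l cur acc hlen hmem
    cases l with
    | nil => simp at hmem
    | cons c rest =>
      by_cases hp : [':'].isPrefixOf (c :: rest) = true
      · refine ⟨cur.reverse, rest, ?_⟩
        simp only [PySem.Chars.splitOnMax.go, hp, if_true]
        rw [pv_go_m0]
        simp
      · have hc : c ≠ ':' := by
          intro e; subst e; simp [List.isPrefixOf] at hp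
        have hmem' : ':' ∈ rest := by
          cases hmem with
          | head => exact absurd rfl hc
          | tail _ h => exact h
        obtain ⟨k, v, hkv⟩ := ih rest (c :: cur) acc (by simp at hlen ⊢; omega) hmem'
        refine ⟨k, v, ?_⟩
        simp only [PySem.Chars.splitOnMax.go]
        rw [if_neg (by omega), if_neg hp]
        exact hkv

lemma pv_split_two (s : String) (h : PySem.Str.isIn ":" s = true) :
    ∃ k v, PySem.Str.splitMax? s ":" 1 = some [k, v] := by
  have hinf := (PySem.Str.isIn_iff_infix ":" s).mp h
  have hmem : ':' ∈ s.toList := hinf.subset (by simp)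
  obtain ⟨k, v, hkv⟩ := pv_go_two (s.length + 1) s.toList [] [] (by simp) hmem
  refine ⟨String.ofList k, String.ofList v, ?_⟩
  simp [PySem.Str.splitMax?, PySem.Chars.splitMax?, PySem.Chars.splitOnMax, hkv]

lemma pv_bnd_spec (parts : List String) : ∀ i, i ≤ parts.length →
    (∀ s ∈ parts.drop i, PySem.Str.isIn ":" s = true) →
    pvBBoundary parts i ≤ i ∧
    (∀ s ∈ parts.drop (pvBBoundary parts i), PySem.Str.isIn ":" s = true) ∧
    (pvBBoundary parts i = 0 ∨
      PySem.Str.isIn ":" (parts.getD (pvBBoundary parts i - 1) "") = false) := by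
  intro i
  induction i with
  | zero => intro _ hcol; exact ⟨le_refl _, hcol, Or.inl rfl⟩
  | succ n ih =>
    intro hle hcol
    by_cases ht : PySem.Str.isIn ":" (parts.getD n "") = true
    · have hn : n < parts.length := by omega
      have hdrop : parts.drop n = parts[n] :: parts.drop (n + 1) :=
        List.drop_eq_getElem_cons hn
      have hcol' : ∀ s ∈ parts.drop n, PySem.Str.isIn ":" s = true := by
        intro s hs
        rw [hdrop] at hs
        cases hs with
        | head => rw [← List.getD_eq_getElem parts "" hn]; exact ht
        | tail _ h => exact hcol s h
      have := ih (by omega) hcol'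
      simp only [pvBBoundary, ht, if_true]
      exact ⟨le_trans this.1 (by omega), this.2.1, this.2.2⟩
    · simp only [pvBBoundary, ht]
      exact ⟨le_refl _, hcol, Or.inr (by simpa using eq_false_of_ne_true ht)⟩

lemma pv_aParseF_append (segs : List String) : ∀ (fuel : Nat) (pre : List String)
    (lastv : String) (d : PySem.Dict String String),
    segs.length < fuel →
    pre.getLast? = some lastv → PySem.Str.isIn ":" lastv = false →
    (∀ s ∈ segs, PySem.Str.isIn ":" s = true) →
    pvAParseF fuel (pre ++ segs) d =
      some (pre, segs.reverse.foldl (fun d s => d.insert (pvKV s).1 (pvKV s).2) d) := by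
  induction segs using List.reverseRecOn with
  | nil =>
    intro fuel pre lastv d hfuel hlast hcolon _
    cases fuel with
    | zero => omega
    | succ f =>
      simp only [List.append_nil, pvAParseF, hlast, hcolon]
      simp
  | append_singleton segs s ih =>
    intro fuel pre lastv d hfuel hlast hcolon hall
    cases fuel with
    | zero => simp at hfuel
    | succ f =>
      have hs : PySem.Str.isIn ":" s = true := hall s (by simp)
      obtain ⟨k, v, hkv⟩ := pv_split_two s hs
      have hassoc : pre ++ (segs ++ [s]) = (pre ++ segs) ++ [s] := by simp
      rw [hassoc]
      simp only [pvAParseF, List.getLast?_concat, hs, if_true, hkv,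
        List.dropLast_concat]
      have hrec := ih f pre lastv (d.insert k v) (by simp at hfuel ⊢; omega)
        hlast hcolon (fun x hx => hall x (by simp [hx]))
      rw [hrec]
      have hkvs : pvKV s = (k, v) := by simp [pvKV, hkv]
      simp [List.reverse_append, hkvs]

lemma pv_aParse_append (segs : List String) : ∀ (pre : List String) (lastv : String)
    (d : PySem.Dict String String),
    pre.getLast? = some lastv → PySem.Str.isIn ":" lastv = false →
    (∀ s ∈ segs, PySem.Str.isIn ":" s = true) →
    pvAParse (pre ++ segs) d =
      some (pre, segs.reverse.foldl (fun d s => d.insert (pvKV s).1 (pvKV s).2) d) := by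
  intro pre lastv d hlast hcolon hall
  exact pv_aParseF_append segs ((pre ++ segs).length + 1) pre lastv d
    (by rw [List.length_append]; omega) hlast hcolon hall

lemma pv_getA (segs : List String) : ∀ (d : PySem.Dict String String) (f : String),
    (segs.reverse.foldl (fun d s => d.insert (pvKV s).1 (pvKV s).2) d).get? f =
      match segs.find? (fun s => (pvKV s).1 == f) with
      | some s => some (pvKV s).2
      | none => d.get? f := by
  induction segs with
  | nil => intro d f; simp
  | cons s rest ih =>
    intro d f
    rw [List.reverse_cons, List.foldl_append]
    simp only [List.foldl_cons, List.foldl_nil]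
    rw [PySem.Dict.get?_insert]
    by_cases h : f = (pvKV s).1
    · simp [h]
    · rw [if_neg h, ih d f]
      have hb : ((pvKV s).1 == f) = false := by
        simp [Ne.symm h]
      simp [hb]

lemma pv_getB (segs : List String) : ∀ (d : PySem.Dict String String) (f : String),
    (∀ s ∈ segs, PySem.Str.isIn ":" s = true) →
    (segs.foldl (fun d seg =>
      match PySem.Str.splitMax? seg ":" 1 with
      | some (key :: value :: _) => if d.contains key then d else d.insert key value
      | _ => d) d).get? f =
      match d.get? f with
      | some v => some v
      | none => pvFind segs f := by
  induction segs with
  | nil =>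
    intro d f _
    cases hd : d.get? f <;> simp [pvFind, hd]
  | cons s rest ih =>
    intro d f hall
    have hs := hall s (by simp)
    obtain ⟨k, v, hkv⟩ := pv_split_two s hs
    have hkvs : pvKV s = (k, v) := by simp [pvKV, hkv]
    have hall' : ∀ x ∈ rest, PySem.Str.isIn ":" x = true :=
      fun x hx => hall x (by simp [hx])
    simp only [List.foldl_cons, hkv]
    by_cases hc : d.contains k = true
    · rw [if_pos hc, ih d f hall']
      have hsome : (d.get? k).isSome := by
        rw [← PySem.Dict.contains_eq_isSome_get?]; exact hc
      by_cases hf : f = k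
      · subst hf
        obtain ⟨w, hw⟩ := Option.isSome_iff_exists.mp hsome
        simp [hw]
      · have hb : ((pvKV s).1 == f) = false := by simp [hkvs, Ne.symm hf]
        cases hd : d.get? f <;> simp [pvFind, hb]
    · rw [if_neg hc, ih (d.insert k v) f hall']
      rw [PySem.Dict.get?_insert]
      by_cases hf : f = k
      · subst hf
        have hnone : d.get? f = none := by
          cases hd : d.get? f with
          | none => rfl
          | some w =>
            rw [PySem.Dict.contains_eq_isSome_get?, hd] at hc
            simp at hc
        have hb : ((pvKV s).1 == f) = true := by simp [hkvs]
        simp [hnone, pvFind, hkvs]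
      · have hb : ((pvKV s).1 == f) = false := by simp [hkvs, Ne.symm hf]
        rw [if_neg hf]
        cases hd : d.get? f <;> simp [pvFind, hb]

lemma pv_reinsert (g : String → String) : ∀ (ks : List String)
    (e : PySem.Dict String String) (f : String),
    (ks.foldl (fun d k => d.insert k (g k)) e).get? f =
      if f ∈ ks then some (g f) else e.get? f := by
  intro ks
  induction ks with
  | nil => intro e f; simp
  | cons k ks ih =>
    intro e f
    simp only [List.foldl_cons]
    rw [ih]
    by_cases hmem : f ∈ ks
    · simp [hmem]
    · rw [if_neg hmem, PySem.Dict.get?_insert]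
      by_cases hf : f = k
      · simp [hf]
      · simp [hf, hmem]

-- ===== VERDICT (by name: the statement is the Claim_ definition above) =====
theorem key_from_metrics_py_spec : Claim_equal_key_from_metrics_py := by
  intro fields metric _ hpre
  unfold Spec_key_from_metrics_py
  obtain ⟨p, hp, hpc⟩ := hpre
  set parts : List String := (PySem.Str.split? metric "__").getD [metric] with hpartsdef
  obtain ⟨hjle, hcolon, hor⟩ := pv_bnd_spec parts parts.length (le_refl _) (by simp)
  set j := pvBBoundary parts parts.length with hjdef
  have hj0 : j ≠ 0 := by
    intro e
    rw [e, List.drop_zero] at hcolon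
    have := hcolon p hp
    rw [this] at hpc
    cases hpc
  have hlperts : 0 < parts.length := by omega
  have hjlen : j - 1 < parts.length := by omega
  have hgetD : parts.getD (j - 1) "" = parts[j - 1] := List.getD_eq_getElem parts "" hjlen
  have hor' : PySem.Str.isIn ":" (parts[j - 1]) = false := by
    rw [← hgetD]; exact hor.resolve_left hj0
  have htklen : (parts.take j).length = j := by
    rw [List.length_take]; omega
  have hlast : (parts.take j).getLast? = some (parts[j - 1]) := by
    rw [List.getLast?_eq_getElem?, htklen, List.getElem?_take_of_lt (by omega),
      List.getElem?_eq_getElem hjlen]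
  have hA : pvAParse parts PySem.Dict.empty =
      some (parts.take j, (parts.drop j).reverse.foldl
        (fun d s => d.insert (pvKV s).1 (pvKV s).2) PySem.Dict.empty) := by
    have := pv_aParse_append (parts.drop j) (parts.take j) (parts[j - 1])
      PySem.Dict.empty hlast hor' hcolon
    rwa [List.take_append_drop] at this
  -- evaluate both ports
  show key_from_metrics_py fields metric = key_from_metrics_py_alt fields metric
  unfold key_from_metrics_py key_from_metrics_py_alt
  simp only [← hpartsdef, ← hjdef, hA]
  rw [PySem.List.foldl_append_singleton_eq_map]
  rw [List.nil_append]
  apply List.map_congr_left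
  intro field _
  by_cases hf : field == ""
  · simp [hf]
  · simp only [hf]
    -- both sides are lookups for field in the two modifier dicts
    set dA := (parts.drop j).reverse.foldl
      (fun d s => d.insert (pvKV s).1 (pvKV s).2) PySem.Dict.empty with hdA
    -- A's reinserted dict answers exactly what dA answers
    have hAside : ((dA.keys.reverse).foldl
        (fun d k => d.insert k (dA.getD k "")) PySem.Dict.empty).get? field = dA.get? field := by
      rw [pv_reinsert (fun k => dA.getD k "") dA.keys.reverse PySem.Dict.empty field]
      by_cases hmem : field ∈ dA.keys
      · rw [if_pos (by simpa using hmem)]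
        cases hg : dA.get? field with
        | none => exact absurd ((PySem.Dict.get?_eq_none_iff_not_mem_keys dA field).mp hg) (by simp [hmem])
        | some w => rw [PySem.Dict.getD_eq_get?_getD, hg]; rfl
      · rw [if_neg (by simpa using hmem), PySem.Dict.get?_empty]
        exact ((PySem.Dict.get?_eq_none_iff_not_mem_keys dA field).mpr hmem).symm
    have hAfind : dA.get? field = match (parts.drop j).find? (fun s => (pvKV s).1 == field) with
        | some s => some (pvKV s).2
        | none => none := by
      rw [hdA, pv_getA]
      cases (parts.drop j).find? (fun s => (pvKV s).1 == field) <;> simp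
    have hBfind := pv_getB (parts.drop j) PySem.Dict.empty field hcolon
    rw [PySem.Dict.get?_empty] at hBfind
    rw [PySem.Dict.getD_eq_get?_getD, PySem.Dict.getD_eq_get?_getD,
      hAside, hAfind, hBfind]
    simp [pvFind]
    cases (parts.drop j).find? (fun s => (pvKV s).1 == field) <;> simp
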